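-- pv_equiv track=rewrite | github.com/thatrebeccarae/dgtldept | skill-packs/dtc-skill-pack/klaviyo-developer/scripts/dev_tools.py | _recommend_health_fixes
-- ===== SOURCE A (Python) =====
-- from typing import Dict, List, Optional
--
-- def _recommend_health_fixes(checks: List[Dict]) -> List[Dict]:
--     """Generate recommendations from health check results."""
--     recommendations = []
--
--     for check in checks:
--         if check["status"] == "fail":
--             if "connectivity" in check["check"].lower():
--                 recommendations.append({
--                     "priority": "CRITICAL",
--                     "action": "Fix API authentication",
--                     "reason": check["detail"],
--                     "expected_impact": "Restore all Klaviyo integrations",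
--                 })
--             elif "scope" in check["check"].lower():
--                 recommendations.append({
--                     "priority": "HIGH",
--                     "action": f"Enable missing scope for {check['check']}",
--                     "reason": check["detail"],
--                     "expected_impact": "Restore access to this resource",
--                 })
--         elif check["status"] == "warning":
--             if "events" in check["check"].lower():
--                 recommendations.append({
--                     "priority": "HIGH",
--                     "action": "Implement missing e-commerce event tracking",
--                     "reason": check["detail"],
--                     "expected_impact": "Enable automated flows for missing events",
--                 })
--
--     if not recommendations:
--         recommendations.append({
--             "priority": "INFO",
--             "action": "All health checks passed",
--             "reason": "Integration is healthy",
--             "expected_impact": "Continue monitoring",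
--         })
--
--     return recommendations
-- ===== SOURCE B (Python) =====
-- _STATUS_KEYWORDS = {"fail": ("connectivity", "scope"), "warning": ("events",)}
--
-- _TEMPLATES = {
--     "connectivity": lambda c: {
--         "priority": "CRITICAL",
--         "action": "Fix API authentication",
--         "reason": c["detail"],
--         "expected_impact": "Restore all Klaviyo integrations",
--     },
--     "scope": lambda c: {
--         "priority": "HIGH",
--         "action": "Enable missing scope for " + c["check"],
--         "reason": c["detail"],
--         "expected_impact": "Restore access to this resource",
--     },
--     "events": lambda c: {
--         "priority": "HIGH",
--         "action": "Implement missing e-commerce event tracking",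
--         "reason": c["detail"],
--         "expected_impact": "Enable automated flows for missing events",
--     },
-- }
--
--
-- def _classify(check):
--     """Map one health check to its recommendation, or None."""
--     keywords = _STATUS_KEYWORDS.get(check["status"])
--     if not keywords:
--         return None
--     name = check["check"].lower()
--     hits = [k for k in keywords if k in name]
--     return _TEMPLATES[hits[0]](check) if hits else None
--
--
-- def _recommend_health_fixes(checks):
--     """Generate recommendations from health check results."""
--     recs = [r for r in map(_classify, checks) if r is not None]
--     return recs or [{
--         "priority": "INFO",
--         "action": "All health checks passed",
--         "reason": "Integration is healthy",
--         "expected_impact": "Continue monitoring",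
--     }]
-- ===== Notes on version B (the rewrite author's own statement) =====
-- stated objective: idiomatic
-- what changed: Replaces the per-check if/elif branch ladder by a classification function driven by two dicts (status -> keyword tuple, keyword -> template builder) that returns an Optional recommendation, assembled by a map/filter-None pipeline with the INFO fallback as 'recs or [...]'.
import Mathlib
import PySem

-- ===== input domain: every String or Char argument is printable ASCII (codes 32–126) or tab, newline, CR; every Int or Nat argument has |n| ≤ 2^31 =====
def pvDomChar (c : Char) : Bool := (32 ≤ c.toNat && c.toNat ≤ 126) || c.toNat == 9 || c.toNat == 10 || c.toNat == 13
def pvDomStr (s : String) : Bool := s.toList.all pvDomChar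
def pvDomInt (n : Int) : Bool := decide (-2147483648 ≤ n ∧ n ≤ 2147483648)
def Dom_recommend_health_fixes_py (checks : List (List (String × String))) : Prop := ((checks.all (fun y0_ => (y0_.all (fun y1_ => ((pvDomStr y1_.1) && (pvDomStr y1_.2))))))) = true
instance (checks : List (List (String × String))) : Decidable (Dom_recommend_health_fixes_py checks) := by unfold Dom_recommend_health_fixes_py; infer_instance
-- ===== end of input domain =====

-- B replaces A's if/elif ladder by a dict-driven Optional classifier composed with a map/filter pipeline (idiomatic, same cost).

-- ===== PORT A =====
-- check[k]: first-match association-list lookup; "" default is never hit inside Pre_ (KeyError is excluded there)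
def pvGet (d : List (String × String)) (k : String) : String :=
  ((d.find? (fun p => p.1 == k)).map Prod.snd).getD ""

def recommend_health_fixes_py (checks : List (List (String × String))) : List (List (String × String)) :=
  let recommendations := checks.foldl (fun acc check =>
    if pvGet check "status" = "fail" then
      if PySem.Str.isIn "connectivity" (PySem.Str.lower (pvGet check "check")) then
        acc ++ [[("priority", "CRITICAL"),
                 ("action", "Fix API authentication"),
                 ("reason", pvGet check "detail"),
                 ("expected_impact", "Restore all Klaviyo integrations")]]
      else if PySem.Str.isIn "scope" (PySem.Str.lower (pvGet check "check")) then
        acc ++ [[("priority", "HIGH"),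
                 ("action", "Enable missing scope for " ++ pvGet check "check"),
                 ("reason", pvGet check "detail"),
                 ("expected_impact", "Restore access to this resource")]]
      else acc
    else if pvGet check "status" = "warning" then
      if PySem.Str.isIn "events" (PySem.Str.lower (pvGet check "check")) then
        acc ++ [[("priority", "HIGH"),
                 ("action", "Implement missing e-commerce event tracking"),
                 ("reason", pvGet check "detail"),
                 ("expected_impact", "Enable automated flows for missing events")]]
      else acc
    else acc) []
  if recommendations = [] then
    [[("priority", "INFO"),
      ("action", "All health checks passed"),
      ("reason", "Integration is healthy"),
      ("expected_impact", "Continue monitoring")]]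
  else recommendations

-- ===== PORT B =====
-- _STATUS_KEYWORDS: status -> tuple of keywords to look for
def pvStatusKeywords : PySem.Dict String (List String) :=
  PySem.Dict.ofList [("fail", ["connectivity", "scope"]), ("warning", ["events"])]

-- _TEMPLATES: keyword -> recommendation builder
def pvTemplates : PySem.Dict String (List (String × String) → List (String × String)) :=
  PySem.Dict.ofList [("connectivity", fun c =>
      [("priority", "CRITICAL"),
       ("action", "Fix API authentication"),
       ("reason", pvGet c "detail"),
       ("expected_impact", "Restore all Klaviyo integrations")]),
   ("scope", fun c =>
      [("priority", "HIGH"),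
       ("action", "Enable missing scope for " ++ pvGet c "check"),
       ("reason", pvGet c "detail"),
       ("expected_impact", "Restore access to this resource")]),
   ("events", fun c =>
      [("priority", "HIGH"),
       ("action", "Implement missing e-commerce event tracking"),
       ("reason", pvGet c "detail"),
       ("expected_impact", "Enable automated flows for missing events")])]

-- _classify: one check -> Optional recommendation (the getD default is never hit: hits ⊆ template keys, so _TEMPLATES[hits[0]] never raises)
def pvClassify (c : List (String × String)) : Option (List (String × String)) :=
  match PySem.Dict.get? pvStatusKeywords (pvGet c "status") with
  | none => none
  | some keywords =>
    let name := PySem.Str.lower (pvGet c "check")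
    let hits := keywords.filter (fun k => PySem.Str.isIn k name)
    match hits with
    | [] => none
    | k :: _ => some ((PySem.Dict.getD pvTemplates k (fun _ => [])) c)

def recommend_health_fixes_py_alt (checks : List (List (String × String))) : List (List (String × String)) :=
  let recs := (checks.map pvClassify).filterMap id
  if recs.isEmpty then
    [[("priority", "INFO"),
      ("action", "All health checks passed"),
      ("reason", "Integration is healthy"),
      ("expected_impact", "Continue monitoring")]]
  else recs

-- ===== PRECONDITION & SPEC =====
def pvHas (d : List (String × String)) (k : String) : Bool :=
  (d.find? (fun p => p.1 == k)).isSome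

-- Pre_ excludes exactly the inputs where Python A raises KeyError: every check needs "status",
-- a "fail"/"warning" check needs "check", and a check whose branch fires needs "detail".
def Pre_recommend_health_fixes_py (checks : List (List (String × String))) : Prop :=
  (checks.all (fun c =>
    pvHas c "status" &&
    (if pvGet c "status" = "fail" then
        pvHas c "check" &&
          (!(PySem.Str.isIn "connectivity" (PySem.Str.lower (pvGet c "check"))
             || PySem.Str.isIn "scope" (PySem.Str.lower (pvGet c "check")))
           || pvHas c "detail")
      else if pvGet c "status" = "warning" then
        pvHas c "check" &&
          (!(PySem.Str.isIn "events" (PySem.Str.lower (pvGet c "check"))) || pvHas c "detail")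
      else true))) = true
instance (checks : List (List (String × String))) : Decidable (Pre_recommend_health_fixes_py checks) := by
  unfold Pre_recommend_health_fixes_py; infer_instance

def pvWitness_recommend_health_fixes_py : (List (List (String × String))) :=
  [[("status", "fail"), ("check", "API Connectivity"), ("detail", "bad key")],
   [("status", "pass"), ("check", "Scopes")],
   [("status", "warning"), ("check", "Events Feed"), ("detail", "no orders")]]

def Spec_recommend_health_fixes_py (checks : List (List (String × String))) (out : List (List (String × String))) : Prop := out = recommend_health_fixes_py_alt checks
instance (checks : List (List (String × String))) (out : List (List (String × String))) : Decidable (Spec_recommend_health_fixes_py checks out) := by unfold Spec_recommend_health_fixes_py; infer_instance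

-- ===== CLAIM (what is proved, stated in full; the proofs are below) =====
def Claim_equal_recommend_health_fixes_py : Prop := ∀ (checks : List (List (String × String))), Dom_recommend_health_fixes_py checks → Pre_recommend_health_fixes_py checks → Spec_recommend_health_fixes_py checks (recommend_health_fixes_py checks)

-- ===== LEMMAS AND PROOFS =====

theorem pvSK_items : pvStatusKeywords.items = [("fail", ["connectivity", "scope"]), ("warning", ["events"])] := rfl

theorem pvT_items : pvTemplates.items =
  [("connectivity", fun c =>
      [("priority", "CRITICAL"),
       ("action", "Fix API authentication"),
       ("reason", pvGet c "detail"),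
       ("expected_impact", "Restore all Klaviyo integrations")]),
   ("scope", fun c =>
      [("priority", "HIGH"),
       ("action", "Enable missing scope for " ++ pvGet c "check"),
       ("reason", pvGet c "detail"),
       ("expected_impact", "Restore access to this resource")]),
   ("events", fun c =>
      [("priority", "HIGH"),
       ("action", "Implement missing e-commerce event tracking"),
       ("reason", pvGet c "detail"),
       ("expected_impact", "Enable automated flows for missing events")])] := rfl

-- A's loop body appends, per check, exactly the 0/1-element block of B's classifier
theorem pv_body_eq (acc : List (List (String × String))) (c : List (String × String)) :
    (if pvGet c "status" = "fail" then
      if PySem.Str.isIn "connectivity" (PySem.Str.lower (pvGet c "check")) then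
        acc ++ [[("priority", "CRITICAL"),
                 ("action", "Fix API authentication"),
                 ("reason", pvGet c "detail"),
                 ("expected_impact", "Restore all Klaviyo integrations")]]
      else if PySem.Str.isIn "scope" (PySem.Str.lower (pvGet c "check")) then
        acc ++ [[("priority", "HIGH"),
                 ("action", "Enable missing scope for " ++ pvGet c "check"),
                 ("reason", pvGet c "detail"),
                 ("expected_impact", "Restore access to this resource")]]
      else acc
    else if pvGet c "status" = "warning" then
      if PySem.Str.isIn "events" (PySem.Str.lower (pvGet c "check")) then
        acc ++ [[("priority", "HIGH"),
                 ("action", "Implement missing e-commerce event tracking"),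
                 ("reason", pvGet c "detail"),
                 ("expected_impact", "Enable automated flows for missing events")]]
      else acc
    else acc) = acc ++ (pvClassify c).toList := by
  unfold pvClassify
  by_cases hf : pvGet c "status" = "fail"
  · by_cases hc : PySem.Str.isIn "connectivity" (PySem.Str.lower (pvGet c "check")) = true <;>
      by_cases hs : PySem.Str.isIn "scope" (PySem.Str.lower (pvGet c "check")) = true <;>
      simp_all [PySem.Dict.get?, PySem.Dict.getD, pvSK_items, pvT_items, List.find?, List.filter]
  · by_cases hw : pvGet c "status" = "warning"
    · by_cases he : PySem.Str.isIn "events" (PySem.Str.lower (pvGet c "check")) = true <;>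
        simp_all [PySem.Dict.get?, PySem.Dict.getD, pvSK_items, pvT_items, List.find?, List.filter]
    · have h1 : ("fail" == pvGet c "status") = false := by
        simp only [beq_eq_false_iff_ne]; exact fun h => hf h.symm
      have h2 : ("warning" == pvGet c "status") = false := by
        simp only [beq_eq_false_iff_ne]; exact fun h => hw h.symm
      simp [PySem.Dict.get?, pvSK_items, List.find?, h1, h2, hf, hw]

-- map/filter-None pipeline = flatMap of the classifier's 0/1-element lists
theorem pv_pipe_eq (checks : List (List (String × String))) :
    (checks.map pvClassify).filterMap id = checks.flatMap (fun c => (pvClassify c).toList) := by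
  induction checks with
  | nil => rfl
  | cons c cs ih =>
    simp only [List.map_cons, List.filterMap_cons, List.flatMap_cons]
    cases h : pvClassify c <;> simp [← ih, List.filterMap_map, id]

-- ===== VERDICT (by name: the statement is the Claim_ definition above) =====
theorem recommend_health_fixes_py_spec : Claim_equal_recommend_health_fixes_py := by
  intro checks _ _
  unfold Spec_recommend_health_fixes_py recommend_health_fixes_py recommend_health_fixes_py_alt
  have hbody : (fun (acc : List (List (String × String))) check =>
      (if pvGet check "status" = "fail" then
        if PySem.Str.isIn "connectivity" (PySem.Str.lower (pvGet check "check")) then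
          acc ++ [[("priority", "CRITICAL"),
                   ("action", "Fix API authentication"),
                   ("reason", pvGet check "detail"),
                   ("expected_impact", "Restore all Klaviyo integrations")]]
        else if PySem.Str.isIn "scope" (PySem.Str.lower (pvGet check "check")) then
          acc ++ [[("priority", "HIGH"),
                   ("action", "Enable missing scope for " ++ pvGet check "check"),
                   ("reason", pvGet check "detail"),
                   ("expected_impact", "Restore access to this resource")]]
        else acc
      else if pvGet check "status" = "warning" then
        if PySem.Str.isIn "events" (PySem.Str.lower (pvGet check "check")) then
          acc ++ [[("priority", "HIGH"),
                   ("action", "Implement missing e-commerce event tracking"),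
                   ("reason", pvGet check "detail"),
                   ("expected_impact", "Enable automated flows for missing events")]]
        else acc
      else acc)) = (fun acc check => acc ++ (pvClassify check).toList) := by
    funext acc check; exact pv_body_eq acc check
  rw [hbody, PySem.List.foldl_append_eq_flatMap, List.nil_append]
  rw [pv_pipe_eq checks]
  by_cases h : checks.flatMap (fun c => (pvClassify c).toList) = [] <;> simp [h]
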